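-- pv_equiv track=rewrite | github.com/guyleafcloud/fantasy-cricket-leafcloud | backend/player_data_importer.py | determine_tier
-- ===== SOURCE A (Python) =====
-- def determine_tier(grade_name: str) -> str:
--     """Determine tier from grade name"""
--     if not grade_name:
--         return 'tier3'
--
--     name_lower = grade_name.lower()
--
--     if 'topklasse' in name_lower or 'hoofdklasse' in name_lower:
--         return 'tier1'
--     elif 'eerste' in name_lower or 'tweede' in name_lower:
--         return 'tier2'
--     elif 'derde' in name_lower or 'vierde' in name_lower:
--         return 'tier3'
--     elif 'zami' in name_lower or 'zomi' in name_lower: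
--         return 'social'
--     elif any(x in name_lower for x in ['u17', 'u15', 'u13', 'u11', 'jeugd']):
--         return 'youth'
--     elif 'vrouwen' in name_lower or 'dames' in name_lower:
--         return 'ladies'
--     else:
--         return 'tier3'
-- ===== SOURCE B (Python) =====
-- # Single sliding-window scan: at each position of the lowered name, check which
-- # keywords start there and keep the minimum rule priority; map it to a tier at the end.
-- KEYWORDS = [
--     ('topklasse', 0), ('hoofdklasse', 0),
--     ('eerste', 1), ('tweede', 1),
--     ('derde', 2), ('vierde', 2),
--     ('zami', 3), ('zomi', 3),
--     ('u17', 4), ('u15', 4), ('u13', 4), ('u11', 4), ('jeugd', 4),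
--     ('vrouwen', 5), ('dames', 5),
-- ]
-- TIERS = ['tier1', 'tier2', 'tier3', 'social', 'youth', 'ladies']
--
--
-- def determine_tier(grade_name: str) -> str:
--     """Determine tier from grade name"""
--     s = grade_name.lower()
--     best = 6
--     for i in range(len(s)):
--         for kw, p in KEYWORDS:
--             if p < best and s.startswith(kw, i):
--                 best = p
--     return TIERS[best] if best < 6 else 'tier3'
-- ===== Notes on version B (the rewrite author's own statement) =====
-- stated objective: alternative
-- what changed: Replaces the if/elif chain of whole-string substring tests with a single sliding-window scan over the lowered name that accumulates the minimum matching keyword priority and maps it to a tier at the end.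
import Mathlib
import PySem

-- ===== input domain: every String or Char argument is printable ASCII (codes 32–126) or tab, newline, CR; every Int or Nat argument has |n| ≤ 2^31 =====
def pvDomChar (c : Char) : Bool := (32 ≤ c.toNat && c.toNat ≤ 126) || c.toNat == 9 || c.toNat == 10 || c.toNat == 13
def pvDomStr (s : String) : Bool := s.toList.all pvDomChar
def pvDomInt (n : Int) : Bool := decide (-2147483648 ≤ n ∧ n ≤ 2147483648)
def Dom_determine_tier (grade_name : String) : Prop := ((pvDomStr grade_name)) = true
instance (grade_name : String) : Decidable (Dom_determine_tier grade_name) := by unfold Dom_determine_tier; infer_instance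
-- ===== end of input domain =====

-- B replaces A's if/elif chain of whole-string substring tests with one sliding-window
-- scan accumulating the minimum matching keyword priority (alternative algorithm, same cost).
-- ===== PORT A =====
def determine_tier (grade_name : String) : String :=
  if grade_name = "" then "tier3"
  else
    let name_lower := PySem.Str.lower grade_name
    if PySem.Str.isIn "topklasse" name_lower || PySem.Str.isIn "hoofdklasse" name_lower then "tier1"
    else if PySem.Str.isIn "eerste" name_lower || PySem.Str.isIn "tweede" name_lower then "tier2"
    else if PySem.Str.isIn "derde" name_lower || PySem.Str.isIn "vierde" name_lower then "tier3"
    else if PySem.Str.isIn "zami" name_lower || PySem.Str.isIn "zomi" name_lower then "social"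
    else if (["u17", "u15", "u13", "u11", "jeugd"] : List String).any (fun x => PySem.Str.isIn x name_lower) then "youth"
    else if PySem.Str.isIn "vrouwen" name_lower || PySem.Str.isIn "dames" name_lower then "ladies"
    else "tier3"

-- ===== PORT B =====
-- keyword → priority table and priority → tier table (Source B's KEYWORDS and TIERS)
def kwTable : List (List Char × Nat) :=
  [("topklasse".toList, 0), ("hoofdklasse".toList, 0),
   ("eerste".toList, 1), ("tweede".toList, 1),
   ("derde".toList, 2), ("vierde".toList, 2),
   ("zami".toList, 3), ("zomi".toList, 3),
   ("u17".toList, 4), ("u15".toList, 4), ("u13".toList, 4), ("u11".toList, 4), ("jeugd".toList, 4),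
   ("vrouwen".toList, 5), ("dames".toList, 5)]

def tierNames : List String := ["tier1", "tier2", "tier3", "social", "youth", "ladies"]

def determine_tier_alt (grade_name : String) : String :=
  let cs := PySem.Chars.lower grade_name.toList
  -- for i in range(len(s)): for kw, p in KEYWORDS: if p < best and s.startswith(kw, i): best = p
  let best : Nat := (List.range cs.length).foldl
    (fun best i =>
      kwTable.foldl (fun b kp => if kp.2 < b ∧ kp.1.isPrefixOf (cs.drop i) then kp.2 else b) best) 6
  -- TIERS[best] if best < 6 else 'tier3'   (the index is in range whenever best < 6, so pyGet? is some)
  if best < 6 then (PySem.List.pyGet? tierNames (best : Int)).getD "tier3" else "tier3"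

-- ===== PRECONDITION & SPEC =====
def Spec_determine_tier (grade_name : String) (out : String) : Prop := out = determine_tier_alt grade_name
instance (grade_name : String) (out : String) : Decidable (Spec_determine_tier grade_name out) := by unfold Spec_determine_tier; infer_instance

-- ===== CLAIM (what is proved, stated in full; the proofs are below) =====
def Claim_equal_determine_tier : Prop := ∀ (grade_name : String), Dom_determine_tier grade_name → Spec_determine_tier grade_name (determine_tier grade_name)

-- ===== LEMMAS AND PROOFS =====

-- candidate priorities contributed at position i
def prefsAt (cs : List Char) (i : Nat) : List Nat :=
  kwTable.filterMap (fun kp => if kp.1.isPrefixOf (cs.drop i) then some kp.2 else none)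

def cands (cs : List Char) : List Nat := (List.range cs.length).flatMap (prefsAt cs)

-- "some keyword of priority p occurs in cs"
def matchesKw (cs : List Char) (p : Nat) : Prop :=
  ∃ kp ∈ kwTable, kp.2 = p ∧ PySem.Chars.isIn kp.1 cs = true

theorem foldl_min_le_init (L : List Nat) (b : Nat) : L.foldl min b ≤ b := by
  induction L generalizing b with
  | nil => simp
  | cons x L ih => exact le_trans (ih (min b x)) (Nat.min_le_left _ _)

theorem foldl_min_le_mem (L : List Nat) (b x : Nat) (hx : x ∈ L) : L.foldl min b ≤ x := by
  induction L generalizing b with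
  | nil => simp at hx
  | cons y L ih =>
    rcases List.mem_cons.mp hx with h | h
    · subst h; exact le_trans (foldl_min_le_init L _) (Nat.min_le_right _ _)
    · exact ih _ h

theorem foldl_min_eq_or_mem (L : List Nat) (b : Nat) : L.foldl min b = b ∨ L.foldl min b ∈ L := by
  induction L generalizing b with
  | nil => left; rfl
  | cons x L ih =>
    simp only [List.foldl]
    rcases ih (min b x) with h | h
    · rw [h]
      rcases Nat.le_total b x with h' | h'
      · left; exact Nat.min_eq_left h'
      · right; rw [Nat.min_eq_right h']; simp
    · right; exact List.mem_cons_of_mem _ h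

theorem inner_eq (l : List (List Char × Nat)) (t : List Char) (b : Nat) :
    l.foldl (fun b kp => if kp.2 < b ∧ kp.1.isPrefixOf t then kp.2 else b) b
      = (l.filterMap (fun kp => if kp.1.isPrefixOf t then some kp.2 else none)).foldl min b := by
  induction l generalizing b with
  | nil => rfl
  | cons kp l ih =>
    simp only [List.foldl, List.filterMap_cons]
    by_cases hpref : kp.1.isPrefixOf t
    · simp only [hpref, if_true, and_true, List.foldl]
      rw [ih]
      congr 1
      rw [Nat.min_def]; split_ifs <;> omega
    · simp only [hpref, Bool.false_eq_true, and_false, if_false]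
      exact ih b

theorem foldl_foldl_flatMap (L : List Nat) (F : Nat → List Nat) (b : Nat) :
    L.foldl (fun b a => (F a).foldl min b) b = (L.flatMap F).foldl min b := by
  induction L generalizing b with
  | nil => rfl
  | cons x L ih => simp only [List.foldl, List.flatMap_cons, List.foldl_append]; exact ih _

theorem bestVal_eq (cs : List Char) :
    (List.range cs.length).foldl
      (fun best i =>
        kwTable.foldl (fun b kp => if kp.2 < b ∧ kp.1.isPrefixOf (cs.drop i) then kp.2 else b) best) 6
      = (cands cs).foldl min 6 := by
  unfold cands prefsAt
  rw [← foldl_foldl_flatMap]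
  simp only [inner_eq]

theorem kwTable_ne_nil : ∀ kp ∈ kwTable, kp.1 ≠ [] := by decide

theorem mem_cands_iff (cs : List Char) (p : Nat) : p ∈ cands cs ↔ matchesKw cs p := by
  unfold cands prefsAt matchesKw
  simp only [List.mem_flatMap, List.mem_filterMap, List.mem_range]
  constructor
  · rintro ⟨i, hi, kp, hkp, hif⟩
    by_cases hpref : kp.1.isPrefixOf (cs.drop i)
    · simp only [hpref, if_true, Option.some.injEq] at hif
      exact ⟨kp, hkp, hif, (PySem.Chars.exists_prefix_drop_iff_isIn _ _).mp
        ⟨i, List.isPrefixOf_iff_prefix.mp hpref⟩⟩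
    · simp [hpref] at hif
  · rintro ⟨kp, hkp, hp, hin⟩
    rcases (PySem.Chars.exists_prefix_drop_iff_isIn _ _).mpr hin with ⟨j, hj⟩
    have hjlt : j < cs.length := by
      by_contra h
      rw [List.drop_eq_nil_of_le (Nat.le_of_not_lt h)] at hj
      exact kwTable_ne_nil kp hkp (List.prefix_nil.mp hj)
    exact ⟨j, hjlt, kp, hkp, by simp [List.isPrefixOf_iff_prefix.mpr hj, hp]⟩

-- concrete readings of matchesKw at each priority
theorem matches_iff_0 (cs : List Char) : matchesKw cs 0 ↔
    (PySem.Chars.isIn "topklasse".toList cs = true ∨ PySem.Chars.isIn "hoofdklasse".toList cs = true) := by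
  constructor
  · rintro ⟨kp, hkp, hp, hin⟩; fin_cases hkp <;> simp_all
  · rintro (h | h)
    · exact ⟨("topklasse".toList, 0), by simp [kwTable], rfl, h⟩
    · exact ⟨("hoofdklasse".toList, 0), by simp [kwTable], rfl, h⟩

theorem matches_iff_1 (cs : List Char) : matchesKw cs 1 ↔
    (PySem.Chars.isIn "eerste".toList cs = true ∨ PySem.Chars.isIn "tweede".toList cs = true) := by
  constructor
  · rintro ⟨kp, hkp, hp, hin⟩; fin_cases hkp <;> simp_all
  · rintro (h | h)
    · exact ⟨("eerste".toList, 1), by simp [kwTable], rfl, h⟩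
    · exact ⟨("tweede".toList, 1), by simp [kwTable], rfl, h⟩

theorem matches_iff_2 (cs : List Char) : matchesKw cs 2 ↔
    (PySem.Chars.isIn "derde".toList cs = true ∨ PySem.Chars.isIn "vierde".toList cs = true) := by
  constructor
  · rintro ⟨kp, hkp, hp, hin⟩; fin_cases hkp <;> simp_all
  · rintro (h | h)
    · exact ⟨("derde".toList, 2), by simp [kwTable], rfl, h⟩
    · exact ⟨("vierde".toList, 2), by simp [kwTable], rfl, h⟩

theorem matches_iff_3 (cs : List Char) : matchesKw cs 3 ↔
    (PySem.Chars.isIn "zami".toList cs = true ∨ PySem.Chars.isIn "zomi".toList cs = true) := by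
  constructor
  · rintro ⟨kp, hkp, hp, hin⟩; fin_cases hkp <;> simp_all
  · rintro (h | h)
    · exact ⟨("zami".toList, 3), by simp [kwTable], rfl, h⟩
    · exact ⟨("zomi".toList, 3), by simp [kwTable], rfl, h⟩

theorem matches_iff_4 (cs : List Char) : matchesKw cs 4 ↔
    (PySem.Chars.isIn "u17".toList cs = true ∨ PySem.Chars.isIn "u15".toList cs = true ∨
     PySem.Chars.isIn "u13".toList cs = true ∨ PySem.Chars.isIn "u11".toList cs = true ∨
     PySem.Chars.isIn "jeugd".toList cs = true) := by
  constructor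
  · rintro ⟨kp, hkp, hp, hin⟩; fin_cases hkp <;> simp_all
  · rintro (h | h | h | h | h)
    · exact ⟨("u17".toList, 4), by simp [kwTable], rfl, h⟩
    · exact ⟨("u15".toList, 4), by simp [kwTable], rfl, h⟩
    · exact ⟨("u13".toList, 4), by simp [kwTable], rfl, h⟩
    · exact ⟨("u11".toList, 4), by simp [kwTable], rfl, h⟩
    · exact ⟨("jeugd".toList, 4), by simp [kwTable], rfl, h⟩

theorem matches_iff_5 (cs : List Char) : matchesKw cs 5 ↔
    (PySem.Chars.isIn "vrouwen".toList cs = true ∨ PySem.Chars.isIn "dames".toList cs = true) := by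
  constructor
  · rintro ⟨kp, hkp, hp, hin⟩; fin_cases hkp <;> simp_all
  · rintro (h | h)
    · exact ⟨("vrouwen".toList, 5), by simp [kwTable], rfl, h⟩
    · exact ⟨("dames".toList, 5), by simp [kwTable], rfl, h⟩

theorem matches_le_5 (cs : List Char) (p : Nat) (h : matchesKw cs p) : p ≤ 5 := by
  rcases h with ⟨kp, hkp, hp, _⟩
  subst hp
  fin_cases hkp <;> simp

theorem main_eq (g : String) : determine_tier g = determine_tier_alt g := by
  by_cases hg : g = ""
  · subst hg; rfl
  · unfold determine_tier determine_tier_alt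
    rw [if_neg hg]
    simp only [PySem.Str.isIn_eq, PySem.Str.toList_lower, List.any_cons, List.any_nil,
      Bool.or_false]
    rw [bestVal_eq (PySem.Chars.lower g.toList)]
    set cs := PySem.Chars.lower g.toList with hcs
    set M := (cands cs).foldl min 6 with hMdef
    have hle : ∀ p, matchesKw cs p → M ≤ p := fun p hp =>
      foldl_min_le_mem _ _ _ ((mem_cands_iff cs p).mpr hp)
    have hmem : M = 6 ∨ matchesKw cs M := by
      rcases foldl_min_eq_or_mem (cands cs) 6 with h | h
      · exact Or.inl h
      · exact Or.inr ((mem_cands_iff cs M).mp h)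
    by_cases h0 : (PySem.Chars.isIn "topklasse".toList cs || PySem.Chars.isIn "hoofdklasse".toList cs) = true
    · have hm : matchesKw cs 0 := (matches_iff_0 cs).mpr (by simpa using h0)
      have hM : M = 0 := Nat.le_zero.mp (hle 0 hm)
      rw [if_pos h0, hM]
      rfl
    have n0 : ¬ matchesKw cs 0 := fun hm => by
      rcases (matches_iff_0 cs).mp hm with h | h <;> simp_all
    rw [if_neg h0]
    by_cases h1 : (PySem.Chars.isIn "eerste".toList cs || PySem.Chars.isIn "tweede".toList cs) = true
    · have hm : matchesKw cs 1 := (matches_iff_1 cs).mpr (by simpa using h1)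
      have hub : M ≤ 1 := hle 1 hm
      have hM : M = 1 := by
        rcases hmem with h6 | hmm
        · omega
        · interval_cases M
          · exact absurd hmm n0
          · rfl
      rw [if_pos h1, hM]
      rfl
    have n1 : ¬ matchesKw cs 1 := fun hm => by
      rcases (matches_iff_1 cs).mp hm with h | h <;> simp_all
    rw [if_neg h1]
    by_cases h2 : (PySem.Chars.isIn "derde".toList cs || PySem.Chars.isIn "vierde".toList cs) = true
    · have hm : matchesKw cs 2 := (matches_iff_2 cs).mpr (by simpa using h2)
      have hub : M ≤ 2 := hle 2 hm
      have hM : M = 2 := by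
        rcases hmem with h6 | hmm
        · omega
        · interval_cases M
          · exact absurd hmm n0
          · exact absurd hmm n1
          · rfl
      rw [if_pos h2, hM]
      rfl
    have n2 : ¬ matchesKw cs 2 := fun hm => by
      rcases (matches_iff_2 cs).mp hm with h | h <;> simp_all
    rw [if_neg h2]
    by_cases h3 : (PySem.Chars.isIn "zami".toList cs || PySem.Chars.isIn "zomi".toList cs) = true
    · have hm : matchesKw cs 3 := (matches_iff_3 cs).mpr (by simpa using h3)
      have hub : M ≤ 3 := hle 3 hm
      have hM : M = 3 := by
        rcases hmem with h6 | hmm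
        · omega
        · interval_cases M
          · exact absurd hmm n0
          · exact absurd hmm n1
          · exact absurd hmm n2
          · rfl
      rw [if_pos h3, hM]
      rfl
    have n3 : ¬ matchesKw cs 3 := fun hm => by
      rcases (matches_iff_3 cs).mp hm with h | h <;> simp_all
    rw [if_neg h3]
    by_cases h4 : (PySem.Chars.isIn "u17".toList cs || (PySem.Chars.isIn "u15".toList cs ||
        (PySem.Chars.isIn "u13".toList cs || (PySem.Chars.isIn "u11".toList cs ||
        PySem.Chars.isIn "jeugd".toList cs)))) = true
    · have hm : matchesKw cs 4 := (matches_iff_4 cs).mpr (by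
        simp only [Bool.or_eq_true] at h4
        tauto)
      have hub : M ≤ 4 := hle 4 hm
      have hM : M = 4 := by
        rcases hmem with h6 | hmm
        · omega
        · interval_cases M
          · exact absurd hmm n0
          · exact absurd hmm n1
          · exact absurd hmm n2
          · exact absurd hmm n3
          · rfl
      rw [if_pos h4, hM]
      rfl
    have n4 : ¬ matchesKw cs 4 := fun hm => by
      rcases (matches_iff_4 cs).mp hm with h | h | h | h | h <;> simp_all
    rw [if_neg h4]
    by_cases h5 : (PySem.Chars.isIn "vrouwen".toList cs || PySem.Chars.isIn "dames".toList cs) = true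
    · have hm : matchesKw cs 5 := (matches_iff_5 cs).mpr (by simpa using h5)
      have hub : M ≤ 5 := hle 5 hm
      have hM : M = 5 := by
        rcases hmem with h6 | hmm
        · omega
        · interval_cases M
          · exact absurd hmm n0
          · exact absurd hmm n1
          · exact absurd hmm n2
          · exact absurd hmm n3
          · exact absurd hmm n4
          · rfl
      rw [if_pos h5, hM]
      rfl
    have n5 : ¬ matchesKw cs 5 := fun hm => by
      rcases (matches_iff_5 cs).mp hm with h | h <;> simp_all
    rw [if_neg h5]
    have hM : M = 6 := by
      rcases hmem with h6 | hmm
      · exact h6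
      · have hub : M ≤ 5 := matches_le_5 cs M hmm
        interval_cases M
        · exact absurd hmm n0
        · exact absurd hmm n1
        · exact absurd hmm n2
        · exact absurd hmm n3
        · exact absurd hmm n4
        · exact absurd hmm n5
    rw [hM]
    rfl

-- ===== VERDICT (by name: the statement is the Claim_ definition above) =====
theorem determine_tier_spec : Claim_equal_determine_tier := by
  intro g _
  unfold Spec_determine_tier
  exact main_eq g
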